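-- pv_equiv track=rewrite | github.com/luisgnet-org/ghost | ghost/telegram/markdown_v2.py | _split_inline_code
-- ===== SOURCE A (Python) =====
-- from typing import List, Tuple
--
-- def _split_inline_code(text: str) -> List[Tuple[str, str]]:
--     """Split a plain-text segment on single backtick pairs.
--
--     Returns list of (content, "plain"|"inline") tuples.
--     Unclosed backtick at end is treated as plain text (appended literally).
--     """
--     parts = text.split("`")
--     result: List[Tuple[str, str]] = []
--
--     for j, part in enumerate(parts):
--         if j % 2 == 1:
--             # Odd index = inside a `...` inline code span
--             result.append((part, "inline"))
--         else:
--             # Even index = plain text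
--             if part:  # skip empty strings
--                 result.append((part, "plain"))
--
--     # If odd number of backticks, the last "inline" segment is actually unclosed.
--     # We already appended it as "inline" — convert the last one back to "plain"
--     # so it gets escaped instead of wrapped in backticks.
--     if len(parts) % 2 == 0 and result:
--         # Odd number of backtick separators = unclosed inline code
--         # The last entry was mis-classified as "inline"
--         last_content, last_type = result[-1]
--         if last_type == "inline":
--             result[-1] = (last_content, "plain")
--
--     return result
-- ===== SOURCE B (Python) =====
-- from typing import List, Tuple
--
-- def _split_inline_code(text: str) -> List[Tuple[str, str]]:
--     """Single-pass character state machine: a buffer plus an in_code flag."""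
--     result: List[Tuple[str, str]] = []
--     buf = ""
--     in_code = False
--     for ch in text:
--         if ch == "`":
--             if in_code:
--                 result.append((buf, "inline"))
--             elif buf:
--                 result.append((buf, "plain"))
--             buf = ""
--             in_code = not in_code
--         else:
--             buf += ch
--     if in_code:
--         # unclosed backtick: the pending span is plain text
--         result.append((buf, "plain"))
--     elif buf:
--         result.append((buf, "plain"))
--     return result
-- ===== Notes on version B (the rewrite author's own statement) =====
-- stated objective: alternative
-- what changed: Replaced split-on-backtick plus indexed parity loop plus last-element patch-up with a single-pass character state machine carrying a buffer and an in_code flag.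
import Mathlib
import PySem

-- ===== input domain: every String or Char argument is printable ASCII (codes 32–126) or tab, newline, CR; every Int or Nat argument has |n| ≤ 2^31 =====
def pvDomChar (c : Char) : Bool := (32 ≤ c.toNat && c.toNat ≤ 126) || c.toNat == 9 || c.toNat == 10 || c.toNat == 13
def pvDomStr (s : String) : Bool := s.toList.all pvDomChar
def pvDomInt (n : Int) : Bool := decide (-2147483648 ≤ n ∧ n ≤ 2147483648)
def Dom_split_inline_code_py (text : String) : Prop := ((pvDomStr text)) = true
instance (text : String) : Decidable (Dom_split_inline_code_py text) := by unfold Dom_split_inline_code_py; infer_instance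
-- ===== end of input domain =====

-- B replaces A's split/enumerate/patch-last pipeline by a one-pass character state machine (alternative decomposition, same cost).

-- ===== PORT A =====
def split_inline_code_py (text : String) : List (String × String) :=
  -- parts = text.split("`")  (sep nonempty, exact via PySem.Chars.splitOn)
  let parts := (PySem.Chars.splitOn text.toList ['`']).map String.ofList
  -- for j, part in enumerate(parts): …
  let result := (PySem.List.enumerate parts).foldl
    (fun r jp =>
      if PySem.Int.mod jp.1 2 == 1 then r ++ [(jp.2, "inline")]
      else if jp.2 ≠ "" then r ++ [(jp.2, "plain")] else r) []
  -- if len(parts) % 2 == 0 and result: flip a trailing "inline" to "plain"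
  if PySem.Int.mod (Int.ofNat parts.length) 2 == 0 && !result.isEmpty then
    match result.getLast? with
    | some (c, t) => if t == "inline" then result.dropLast ++ [(c, "plain")] else result
    | none => result
  else result

-- ===== PORT B =====
def altGo : List Char → List Char → Bool → List (String × String)
  | [], buf, inCode =>
      if inCode then [(String.ofList buf, "plain")]
      else if buf ≠ [] then [(String.ofList buf, "plain")] else []
  | c :: rest, buf, inCode =>
      if c = '`' then
        if inCode then (String.ofList buf, "inline") :: altGo rest [] false
        else if buf ≠ [] then (String.ofList buf, "plain") :: altGo rest [] true
        else altGo rest [] true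
      else altGo rest (buf ++ [c]) inCode

def split_inline_code_py_alt (text : String) : List (String × String) :=
  altGo text.toList [] false

-- ===== PRECONDITION & SPEC =====
def Spec_split_inline_code_py (text : String) (out : List (String × String)) : Prop := out = split_inline_code_py_alt text
instance (text : String) (out : List (String × String)) : Decidable (Spec_split_inline_code_py text out) := by unfold Spec_split_inline_code_py; infer_instance

-- ===== CLAIM (what is proved, stated in full; the proofs are below) =====
def Claim_equal_split_inline_code_py : Prop := ∀ (text : String), Dom_split_inline_code_py text → Spec_split_inline_code_py text (split_inline_code_py text)

-- ===== LEMMAS AND PROOFS =====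

-- What text.split("`") computes, as a structural recursion.
def plainSplit : List Char → List (List Char)
  | [] => [[]]
  | c :: rest =>
      if c = '`' then [] :: plainSplit rest
      else
        match plainSplit rest with
        | [] => [[c]]
        | h :: t => (c :: h) :: t

def consHead (buf : List Char) : List (List Char) → List (List Char)
  | [] => [buf]
  | h :: t => (buf ++ h) :: t

-- A's enumerate loop, split by parity of the running index.
def procP : Bool → List (List Char) → List (String × String)
  | _, [] => []
  | false, p :: rest =>
      (if String.ofList p ≠ "" then [(String.ofList p, "plain")] else []) ++ procP true rest
  | true, p :: rest => (String.ofList p, "inline") :: procP false rest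

-- A's final patch-up step.
def flipIf (b : Bool) (r : List (String × String)) : List (String × String) :=
  if b && !r.isEmpty then
    match r.getLast? with
    | some (c, t) => if t == "inline" then r.dropLast ++ [(c, "plain")] else r
    | none => r
  else r

theorem plainSplit_ne_nil (cs : List Char) : plainSplit cs ≠ [] := by
  cases cs with
  | nil => simp [plainSplit]
  | cons c rest =>
      simp only [plainSplit]
      split
      · simp
      · split <;> simp

theorem consHead_nil (ps : List (List Char)) (h : ps ≠ []) : consHead [] ps = ps := by
  cases ps with
  | nil => exact absurd rfl h
  | cons a t => simp [consHead]

theorem go_spec (fuel : Nat) :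
    ∀ (l cur acc : List Char) (accL : List (List Char)), l.length < fuel →
      PySem.Chars.splitOn.go ['`'] fuel l cur accL = accL.reverse ++ consHead cur.reverse (plainSplit l) := by
  induction fuel with
  | zero => intro l cur acc accL h; omega
  | succ fuel ih =>
      intro l cur acc accL h
      cases l with
      | nil => simp [PySem.Chars.splitOn.go, plainSplit, consHead]
      | cons c rest =>
          by_cases hc : c = '`'
          · subst hc
            have hpre : List.isPrefixOf ['`'] ('`' :: rest) = true := by
              simp [List.isPrefixOf]
            simp only [PySem.Chars.splitOn.go, hpre, if_true, List.length_cons,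
              List.length_nil, List.drop_succ_cons, List.drop_zero]
            rw [ih rest [] acc (cur.reverse :: accL) (by simpa using Nat.lt_of_succ_lt_succ h)]
            simp only [plainSplit, if_pos rfl]
            cases hp : plainSplit rest with
            | nil => exact absurd hp (plainSplit_ne_nil rest)
            | cons a t => simp [consHead]
          · have hpre : List.isPrefixOf ['`'] (c :: rest) = false := by
              simp [List.isPrefixOf]
              intro hcc; exact hc hcc.symm
            simp only [PySem.Chars.splitOn.go, hpre]
            rw [if_neg (by simp)]
            rw [ih rest (c :: cur) acc accL (by simpa using Nat.lt_of_succ_lt_succ h)]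
            simp only [plainSplit, if_neg hc]
            cases hps : plainSplit rest with
            | nil => exact absurd hps (plainSplit_ne_nil rest)
            | cons hph t => simp [consHead]

theorem splitOn_char (cs : List Char) : PySem.Chars.splitOn cs ['`'] = plainSplit cs := by
  show PySem.Chars.splitOn.go ['`'] (cs.length + 1) cs [] [] = _
  rw [go_spec (cs.length + 1) cs [] [] [] (by omega)]
  simp [consHead_nil _ (plainSplit_ne_nil cs)]

theorem pymod_two (j : Int) : PySem.Int.mod j 2 = j % 2 := by
  simp [PySem.Int.mod, Int.fmod_eq_emod_of_nonneg]

theorem foldl_proc (ps : List (List Char)) :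
    ∀ (j : Int) (r : List (String × String)), 0 ≤ j →
      (PySem.List.enumerate (ps.map String.ofList) j).foldl
        (fun r jp =>
          if PySem.Int.mod jp.1 2 == 1 then r ++ [(jp.2, "inline")]
          else if jp.2 ≠ "" then r ++ [(jp.2, "plain")] else r) r
      = r ++ procP (PySem.Int.mod j 2 == 1) ps := by
  induction ps with
  | nil => intro j r hj; simp [PySem.List.enumerate, procP]
  | cons p rest ih =>
      intro j r hj
      rw [List.map_cons, PySem.List.enumerate_cons, List.foldl_cons]
      rw [ih (j + 1) _ (by omega)]
      have hflip : ((PySem.Int.mod (j + 1) 2 == 1) : Bool) = !(PySem.Int.mod j 2 == 1) := by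
        rw [pymod_two, pymod_two]
        have h2 : j % 2 = 0 ∨ j % 2 = 1 := Int.emod_two_eq_zero_or_one j
        rcases h2 with h | h <;> simp [h, Int.add_mul_emod_self_left] <;> omega
      by_cases hb : (PySem.Int.mod j 2 == 1) = true
      · simp only [hb, if_true, hflip, Bool.not_true]
        simp [procP, hb]
      · have hb' : (PySem.Int.mod j 2 == 1) = false := by simpa using hb
        simp only [hb', Bool.false_eq_true, if_false, hflip, Bool.not_false]
        by_cases hp : String.ofList p ≠ ""
        · simp [hp, procP, hb']
        · simp [hp, procP, hb']

theorem procP_true_ne_nil (ps : List (List Char)) (h : ps ≠ []) : procP true ps ≠ [] := by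
  cases ps with
  | nil => exact absurd rfl h
  | cons a t => simp [procP]

theorem procP_false_ne_nil (ps : List (List Char)) (h : ps ≠ []) (he : ps.length % 2 = 0) :
    procP false ps ≠ [] := by
  cases ps with
  | nil => exact absurd rfl h
  | cons a t =>
      cases t with
      | nil => simp at he
      | cons b t2 => simp [procP]

theorem flipIf_append (b : Bool) (p X : List (String × String)) (h : X ≠ []) :
    flipIf b (p ++ X) = p ++ flipIf b X := by
  unfold flipIf
  have hne : (p ++ X) ≠ [] := by simp [h]
  by_cases hb : b = true
  · simp only [hb, Bool.true_and]
    rw [List.getLast?_append]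
    cases hX : X.getLast? with
    | none => exact absurd (List.getLast?_eq_none_iff.mp hX) h
    | some ct =>
        have hXne : X.isEmpty = false := by simp [List.isEmpty_iff, h]
        have hpXne : (p ++ X).isEmpty = false := by simp [List.isEmpty_iff, h]
        simp only [hpXne, hXne, Bool.not_false, Option.or_some, if_true]
        obtain ⟨c, t⟩ := ct
        by_cases ht : t == "inline"
        · simp [ht, List.dropLast_append, hXne, List.append_assoc]
        · simp [ht]
  · simp [hb]

theorem flipIf_false_of (b : Bool) (r : List (String × String)) (hb : b = false) :
    flipIf b r = r := by simp [flipIf, hb]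

theorem mod_two_flip (n : Nat) : ((n + 1) % 2 == 0) = (n % 2 == 1) := by
  have h : n % 2 = 0 ∨ n % 2 = 1 := Nat.mod_two_eq_zero_or_one n
  rcases h with h | h <;> simp [Nat.add_mod, h]

theorem mod_two_flip' (n : Nat) : ((n + 1) % 2 == 1) = (n % 2 == 0) := by
  have h : n % 2 = 0 ∨ n % 2 = 1 := Nat.mod_two_eq_zero_or_one n
  rcases h with h | h <;> simp [Nat.add_mod, h]

theorem main_lemma (cs : List Char) :
    (∀ buf : List Char,
      altGo cs buf false
        = flipIf ((consHead buf (plainSplit cs)).length % 2 == 0) (procP false (consHead buf (plainSplit cs)))) ∧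
    (∀ buf : List Char,
      altGo cs buf true
        = flipIf ((consHead buf (plainSplit cs)).length % 2 == 1) (procP true (consHead buf (plainSplit cs)))) := by
  induction cs with
  | nil =>
      constructor
      · intro buf
        simp only [plainSplit, consHead, List.append_nil]
        by_cases hb : buf ≠ []
        · have : String.ofList buf ≠ "" := by simpa [String.ofList_eq_empty_iff] using hb
          simp [altGo, hb, procP, this, flipIf]
        · have hb' : buf = [] := by simpa using hb
          subst hb'
          simp [altGo, procP, flipIf]
      · intro buf
        simp only [plainSplit, consHead, List.append_nil]
        simp [altGo, procP, flipIf]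
  | cons c rest ih =>
      obtain ⟨ihE, ihO⟩ := ih
      by_cases hc : c = '`'
      · subst hc
        constructor
        · -- E-state, backtick
          intro buf
          have hps := plainSplit_ne_nil rest
          have hrw : consHead buf (plainSplit ('`' :: rest)) = buf :: plainSplit rest := by
            simp [plainSplit, consHead]
          rw [hrw]
          have hO := ihO []
          rw [consHead_nil _ hps] at hO
          have hlen : (buf :: plainSplit rest).length = (plainSplit rest).length + 1 := by simp
          have hpar : (((plainSplit rest).length + 1) % 2 == 0) = ((plainSplit rest).length % 2 == 1) :=
            mod_two_flip _
          have hstep : procP false (buf :: plainSplit rest)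
              = (if String.ofList buf ≠ "" then [(String.ofList buf, "plain")] else []) ++ procP true (plainSplit rest) := by
            cases hp : plainSplit rest with
            | nil => exact absurd hp hps
            | cons a t => simp [procP]
          rw [hstep, hlen, hpar,
            flipIf_append _ _ _ (procP_true_ne_nil _ hps), ← hO]
          by_cases hb : buf ≠ []
          · have : String.ofList buf ≠ "" := by simpa [String.ofList_eq_empty_iff] using hb
            simp [altGo, hb, this]
          · have hb' : buf = [] := by simpa using hb
            subst hb'
            simp [altGo]
        · -- O-state, backtick
          intro buf
          have hps := plainSplit_ne_nil rest
          have hrw : consHead buf (plainSplit ('`' :: rest)) = buf :: plainSplit rest := by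
            simp [plainSplit, consHead]
          rw [hrw]
          have hE := ihE []
          rw [consHead_nil _ hps] at hE
          have hstep : procP true (buf :: plainSplit rest)
              = (String.ofList buf, "inline") :: procP false (plainSplit rest) := by
            cases hp : plainSplit rest with
            | nil => exact absurd hp hps
            | cons a t => simp [procP]
          have hlen : (buf :: plainSplit rest).length = (plainSplit rest).length + 1 := by simp
          have hpar : (((plainSplit rest).length + 1) % 2 == 1) = ((plainSplit rest).length % 2 == 0) :=
            mod_two_flip' _
          rw [hstep, hlen, hpar]
          by_cases hev : ((plainSplit rest).length % 2 == 0) = true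
          · have hne := procP_false_ne_nil _ hps (by simpa using hev)
            have : (String.ofList buf, "inline") :: procP false (plainSplit rest)
                = [(String.ofList buf, "inline")] ++ procP false (plainSplit rest) := by simp
            rw [this, flipIf_append _ _ _ hne, ← hE]
            simp [altGo]
          · have hev' : ((plainSplit rest).length % 2 == 0) = false := by simpa using hev
            rw [flipIf_false_of _ _ hev']
            rw [flipIf_false_of _ _ hev'] at hE
            rw [← hE]
            simp [altGo]
      · -- non-backtick character
        have hrw : ∀ buf : List Char, consHead buf (plainSplit (c :: rest)) = consHead (buf ++ [c]) (plainSplit rest) := by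
          intro buf
          simp only [plainSplit, if_neg hc]
          cases hp : plainSplit rest with
          | nil => exact absurd hp (plainSplit_ne_nil rest)
          | cons a t => simp [consHead]
        constructor
        · intro buf
          rw [hrw buf, ← ihE (buf ++ [c])]
          simp [altGo, hc]
        · intro buf
          rw [hrw buf, ← ihO (buf ++ [c])]
          simp [altGo, hc]

-- ===== VERDICT (by name: the statement is the Claim_ definition above) =====
theorem split_inline_code_py_spec : Claim_equal_split_inline_code_py := by
  intro text _
  unfold Spec_split_inline_code_py split_inline_code_py split_inline_code_py_alt
  simp only [splitOn_char]
  have hps := plainSplit_ne_nil text.toList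
  rw [foldl_proc (plainSplit text.toList) 0 [] (by omega)]
  have h0 : (PySem.Int.mod 0 2 == 1) = false := by rw [pymod_two]; simp
  rw [h0]
  have hmod : (PySem.Int.mod (Int.ofNat ((plainSplit text.toList).map String.ofList).length) 2 == 0)
      = ((plainSplit text.toList).length % 2 == 0) := by
    rw [pymod_two]
    simp only [List.length_map]
    rcases Nat.mod_two_eq_zero_or_one (plainSplit text.toList).length with h | h <;>
      simp [h] <;> omega
  have hE := (main_lemma text.toList).1 []
  rw [consHead_nil _ hps] at hE
  rw [hE]
  simp only [List.nil_append, flipIf, hmod]
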